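-- pv_equiv track=rewrite | github.com/aanhtran01/EMDeNovoTranscriptionBindingPredictior- | genomeassembler.py | FirstOccurrence_CountSymbol
-- ===== SOURCE A (Python) =====
-- def FirstOccurrence_CountSymbol(burrows_wheeler, alphabet = ['$','A', 'C', 'G', 'T']):
--     l = len(burrows_wheeler)
--     CountSymbol = {}
--     first_occurances = {}
--     for char in alphabet:
--         CountSymbol[char] = [0] * (l + 1)
--     for i in range(l):
--         currChar = burrows_wheeler[i]
--         for char, count in CountSymbol.items():
--             CountSymbol[char][i+1] = CountSymbol[char][i]
--         CountSymbol[currChar][i+1] = CountSymbol[currChar][i+1] + 1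
--     currIndex = 0
--     for char in sorted(alphabet):
--         first_occurances[char] = currIndex
--         currIndex = currIndex + CountSymbol[char][l]
--     return first_occurances, CountSymbol
-- ===== SOURCE B (Python) =====
-- def FirstOccurrence_CountSymbol(burrows_wheeler, alphabet = ['$','A', 'C', 'G', 'T']):
--     # Totals for first_occurances come from a direct symbol count of the BWT
--     # (raises KeyError on characters outside the alphabet, like the original);
--     # each checkpoint column is built independently by a per-symbol scan with a
--     # running counter -- no shared mutable table of columns is ever updated.
--     totals = {}
--     for char in alphabet:
--         totals[char] = 0
--     for ch in burrows_wheeler: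
--         totals[ch] += 1
--     CountSymbol = {}
--     for char in alphabet:
--         col = [0]
--         run = 0
--         for ch in burrows_wheeler:
--             if ch == char:
--                 run += 1
--             col.append(run)
--         CountSymbol[char] = col
--     first_occurances = {}
--     currIndex = 0
--     for char in sorted(alphabet):
--         first_occurances[char] = currIndex
--         currIndex += totals[char]
--     return first_occurances, CountSymbol
-- ===== Notes on version B (the rewrite author's own statement) =====
-- stated objective: alternative
-- what changed: A maintains one shared dict of mutable columns, copying every symbol's running count forward at every BWT position; B counts the BWT once into per-symbol totals and builds each checkpoint column independently with a per-symbol scan and a running counter.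
import Mathlib
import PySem

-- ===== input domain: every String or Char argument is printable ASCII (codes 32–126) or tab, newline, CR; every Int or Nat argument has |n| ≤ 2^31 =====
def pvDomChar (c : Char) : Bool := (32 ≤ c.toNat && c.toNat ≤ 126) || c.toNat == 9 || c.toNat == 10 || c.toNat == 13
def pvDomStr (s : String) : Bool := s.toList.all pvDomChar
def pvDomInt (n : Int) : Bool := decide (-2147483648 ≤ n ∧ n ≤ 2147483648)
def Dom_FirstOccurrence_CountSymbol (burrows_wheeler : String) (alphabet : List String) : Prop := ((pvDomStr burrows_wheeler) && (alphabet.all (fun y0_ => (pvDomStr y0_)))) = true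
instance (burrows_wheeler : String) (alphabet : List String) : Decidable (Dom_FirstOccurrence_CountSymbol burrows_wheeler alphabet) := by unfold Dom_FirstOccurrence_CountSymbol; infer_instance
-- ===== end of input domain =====

-- B builds each symbol's checkpoint column independently with a running counter instead of
-- A's shared dict of mutable columns updated position by position (objective: simpler).

-- ===== PORT A =====
-- A: for i in range(l): copy every column entry i -> i+1 in the shared dict, then increment
-- the current symbol's entry i+1.
def FirstOccurrence_CountSymbol (burrows_wheeler : String) (alphabet : List String) : (List (String × Int)) × (List (String × List Int)) :=
  let cl := burrows_wheeler.toList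
  let l := cl.length
  let cs0 : PySem.Dict String (List Int) :=
    alphabet.foldl (fun d c => d.insert c (List.replicate (l+1) (0 : Int))) PySem.Dict.empty
  let cs := (List.range l).foldl (fun d i =>
      let currChar := String.mk [cl.getD i ' ']
      let d1 := d.keys.foldl (fun d' k => d'.modify k [] (fun v => v.set (i+1) (v.getD i 0))) d
      d1.modify currChar [] (fun v => v.set (i+1) (v.getD (i+1) 0 + 1))) cs0
  let fo := (PySem.List.sorted alphabet (fun x => x) false).foldl
      (fun (p : PySem.Dict String Int × Int) c =>
        (p.1.insert c p.2, p.2 + (cs.getD c []).getD l 0)) (PySem.Dict.empty, 0)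
  (fo.1.items, cs.items)

-- ===== PORT B =====
-- B: count the BWT once into per-symbol totals (indexing by the current character, as the
-- Python does), then one independent scan per alphabet symbol building its column with a
-- running counter; the dict receives each finished column once.
def FirstOccurrence_CountSymbol_alt (burrows_wheeler : String) (alphabet : List String) : (List (String × Int)) × (List (String × List Int)) :=
  let cl := burrows_wheeler.toList
  let totals : PySem.Dict String Int :=
    (cl.map (fun ch => String.mk [ch])).foldl (fun d s => d.modify s 0 (· + 1))
      (alphabet.foldl (fun d char => d.insert char (0 : Int)) PySem.Dict.empty)
  let cs : PySem.Dict String (List Int) :=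
    alphabet.foldl (fun d char =>
      let col := cl.foldl (fun (p : List Int × Int) ch =>
          let run := if String.mk [ch] = char then p.2 + 1 else p.2
          (p.1 ++ [run], run)) ([(0 : Int)], (0 : Int))
      d.insert char col.1) PySem.Dict.empty
  let fo := (PySem.List.sorted alphabet (fun x => x) false).foldl
      (fun (p : PySem.Dict String Int × Int) c =>
        (p.1.insert c p.2, p.2 + totals.getD c 0)) (PySem.Dict.empty, 0)
  (fo.1.items, cs.items)

-- ===== PRECONDITION & SPEC =====
-- Pre_ excludes exactly the inputs where the text contains a character that is not an alphabet
-- symbol: there Python A raises KeyError.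
def Pre_FirstOccurrence_CountSymbol (burrows_wheeler : String) (alphabet : List String) : Prop :=
  (burrows_wheeler.toList.all (fun c => alphabet.contains (String.mk [c]))) = true
instance (burrows_wheeler : String) (alphabet : List String) : Decidable (Pre_FirstOccurrence_CountSymbol burrows_wheeler alphabet) := by unfold Pre_FirstOccurrence_CountSymbol; infer_instance
def pvWitness_FirstOccurrence_CountSymbol : String × List String := ("AC$A", ["$", "A", "C", "G", "T"])

def Spec_FirstOccurrence_CountSymbol (burrows_wheeler : String) (alphabet : List String) (out : (List (String × Int)) × (List (String × List Int))) : Prop := out = FirstOccurrence_CountSymbol_alt burrows_wheeler alphabet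
instance (burrows_wheeler : String) (alphabet : List String) (out : (List (String × Int)) × (List (String × List Int))) : Decidable (Spec_FirstOccurrence_CountSymbol burrows_wheeler alphabet out) := by unfold Spec_FirstOccurrence_CountSymbol; infer_instance

-- ===== CLAIM (what is proved, stated in full; the proofs are below) =====
def Claim_equal_FirstOccurrence_CountSymbol : Prop := ∀ (burrows_wheeler : String) (alphabet : List String), Dom_FirstOccurrence_CountSymbol burrows_wheeler alphabet → Pre_FirstOccurrence_CountSymbol burrows_wheeler alphabet → Spec_FirstOccurrence_CountSymbol burrows_wheeler alphabet (FirstOccurrence_CountSymbol burrows_wheeler alphabet)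

-- ===== LEMMAS AND PROOFS =====

def pvCnt (cl : List Char) (c : String) (j : Nat) : Int :=
  ((cl.take j).countP (fun ch => String.mk [ch] == c) : Int)

def pvInd (cl : List Char) (c : String) (t : Nat) : Int :=
  if String.mk [cl.getD t ' '] = c then 1 else 0

theorem pv_cnt_succ (cl : List Char) (c : String) {n : Nat} (h : n < cl.length) :
    pvCnt cl c (n+1) = pvCnt cl c n + pvInd cl c n := by
  unfold pvCnt pvInd
  rw [List.take_succ, List.getElem?_eq_getElem h, List.getD_eq_getElem cl ' ' h]
  rw [List.countP_append]
  simp only [Option.toList_some, List.countP_cons, List.countP_nil]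
  by_cases h1 : String.mk [cl[n]] = c
  · simp [h1]
  · simp [h1]

-- A's column function: after n outer iterations, entry j of symbol c's column
def pvGA (cl : List Char) (c : String) (n : Nat) : Nat → Int :=
  fun j => if j ≤ n then pvCnt cl c j else 0

theorem pv_replicate_eq (cl : List Char) (c : String) :
    List.replicate (cl.length+1) (0:Int) = (List.range (cl.length+1)).map (pvGA cl c 0) := by
  apply List.ext_getElem
  · simp
  · intro i h1 h2
    simp only [List.getElem_replicate, List.getElem_map, List.getElem_range]
    by_cases hi : i = 0
    · subst hi; simp [pvGA, pvCnt]
    · simp [pvGA, hi]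

theorem pv_cnt_zero (cl : List Char) (c : String) : pvCnt cl c 0 = 0 := by simp [pvCnt]

theorem pv_GA_step (cl : List Char) (c : String) (n : Nat) (x : Int)
    (hx : x = pvCnt cl c (n+1)) (g : Nat → Int) (hg : ∀ j, j ≠ n+1 → g j = pvGA cl c n j) :
    (List.range (cl.length+1)).map (fun j => if j = n+1 then x else g j)
      = (List.range (cl.length+1)).map (pvGA cl c (n+1)) := by
  apply List.map_congr_left
  intro j hj
  subst hx
  by_cases h0 : j = n+1
  · subst h0; rw [if_pos rfl]; unfold pvGA; rw [if_pos (le_refl (n+1))]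
  · rw [if_neg h0, hg j h0]
    unfold pvGA
    by_cases h2 : j ≤ n
    · rw [if_pos h2, if_pos (by omega)]
    · rw [if_neg h2, if_neg (show ¬ j ≤ n+1 by omega)]

theorem pv_GA_full (cl : List Char) (c : String) :
    (List.range (cl.length+1)).map (pvGA cl c cl.length)
      = (List.range (cl.length+1)).map (fun j => pvCnt cl c j) := by
  apply List.map_congr_left
  intro j hj
  rw [List.mem_range] at hj
  unfold pvGA
  rw [if_pos (by omega)]

-- generic dictionary lemmas
theorem pv_update_self {s : PySem.Set String} {ks : List String}
    (h : ∀ k ∈ ks, k ∈ s) : PySem.Set.update s ks = s := by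
  induction ks generalizing s with
  | nil => rfl
  | cons a as ih =>
    have ha : PySem.Set.add s a = s := by
      simp [PySem.Set.add, PySem.Set.contains, h a (by simp)]
    calc PySem.Set.update s (a :: as) = PySem.Set.update (PySem.Set.add s a) as := rfl
      _ = s := by rw [ha]; exact ih (fun k hk => h k (by simp [hk]))

theorem pv_getD_foldl_insertf {ν : Type} (al : List String) (f : String → ν) (d0 : ν)
    (d : PySem.Dict String ν) (c : String) :
    (al.foldl (fun d k => d.insert k (f k)) d).getD c d0 = if c ∈ al then f c else d.getD c d0 := by
  induction al generalizing d with
  | nil => simp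
  | cons a as ih =>
    simp only [List.foldl_cons, ih, PySem.Dict.getD_insert, List.mem_cons]
    by_cases hc : c ∈ as <;> by_cases he : c = a <;> simp [hc, he]

theorem pv_getD_foldl_modify (ks : List String) (hnd : ks.Nodup) (f : List Int → List Int)
    (d : PySem.Dict String (List Int)) (c : String) :
    (ks.foldl (fun d' k => d'.modify k [] f) d).getD c [] = if c ∈ ks then f (d.getD c []) else d.getD c [] := by
  induction ks generalizing d with
  | nil => simp
  | cons a as ih =>
    have hnd' : as.Nodup := hnd.of_cons
    simp only [List.foldl_cons, ih hnd', PySem.Dict.getD_modify, List.mem_cons]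
    by_cases hc : c ∈ as
    · have : c ≠ a := fun he => (List.nodup_cons.mp hnd).1 (he ▸ hc)
      simp [hc, this]
    · by_cases he : c = a
      · subst he; simp [hc]
      · simp [hc, he]

theorem pv_items_eq (d : PySem.Dict String (List Int)) (hnd : d.keys.Nodup) :
    d.items = d.keys.map (fun k => (k, d.getD k [])) := by
  have h1 : d.keys.map (fun k => (k, d.getD k [])) = d.items.map (fun p => (p.1, d.getD p.1 [])) := by
    simp [PySem.Dict.keys, List.map_map, Function.comp]
  rw [h1]
  have h2 : ∀ p ∈ d.items, (p.1, d.getD p.1 ([] : List Int)) = p := by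
    intro p hp
    have := PySem.Dict.getD_of_mem_items d (k := p.1) (v := p.2) (by simpa using hp) hnd ([])
    simp [this]
  simp [List.map_congr_left h2]

theorem pv_set_map_range (m j : Nat) (x : Int) (g : Nat → Int) (h : j < m) :
    ((List.range m).map g).set j x = (List.range m).map (fun i => if i = j then x else g i) := by
  apply List.ext_getElem <;> simp
  intro i hi
  rw [List.getElem_set]
  by_cases he : j = i <;> simp [he]
  exact fun hh => absurd hh.symm he

-- the initial dict of A and A's loop body, named for the proofs
def pvInit (L : Nat) (alphabet : List String) : PySem.Dict String (List Int) :=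
  alphabet.foldl (fun d c => d.insert c (List.replicate (L+1) (0 : Int))) PySem.Dict.empty

theorem pv_keys_init (L : Nat) (alphabet : List String) :
    (pvInit L alphabet).keys = PySem.Set.ofList alphabet := by
  unfold pvInit
  rw [PySem.Dict.keys_foldl_insert alphabet (fun _ _ => List.replicate (L+1) (0:Int)) PySem.Dict.empty]
  rw [PySem.Dict.keys_empty, PySem.Set.ofList_eq_foldl]
  rfl

theorem pv_nodup_init (L : Nat) (alphabet : List String) : (pvInit L alphabet).keys.Nodup := by
  unfold pvInit
  exact PySem.Dict.nodup_keys_foldl_insert alphabet _ _ (by simp)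

theorem pv_mem_keys_init (L : Nat) (alphabet : List String) (c : String) :
    c ∈ (pvInit L alphabet).keys ↔ c ∈ alphabet := by
  rw [pv_keys_init]; exact PySem.Set.mem_ofList alphabet c

theorem pv_getD_init (L : Nat) (alphabet : List String) (c : String) (hc : c ∈ alphabet) :
    (pvInit L alphabet).getD c [] = List.replicate (L+1) (0 : Int) := by
  unfold pvInit
  rw [pv_getD_foldl_insertf alphabet (fun _ => List.replicate (L+1) (0:Int)) [], if_pos hc]

def pvStepA (cl : List Char) (d : PySem.Dict String (List Int)) (i : Nat) : PySem.Dict String (List Int) :=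
  let currChar := String.mk [cl.getD i ' ']
  let d1 := d.keys.foldl (fun d' k => d'.modify k [] (fun v => v.set (i+1) (v.getD i 0))) d
  d1.modify currChar [] (fun v => v.set (i+1) (v.getD (i+1) 0 + 1))

theorem pv_curr_mem (cl : List Char) (alphabet : List String)
    (hPre : ∀ ch ∈ cl, String.mk [ch] ∈ alphabet) {n : Nat} (h : n < cl.length) :
    String.mk [cl.getD n ' '] ∈ alphabet := by
  rw [List.getD_eq_getElem cl ' ' h]
  exact hPre _ (List.getElem_mem h)

theorem pv_A_loop (cl : List Char) (alphabet : List String)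
    (hPre : ∀ ch ∈ cl, String.mk [ch] ∈ alphabet) (n : Nat) (hn : n ≤ cl.length) :
    ((List.range n).foldl (pvStepA cl) (pvInit cl.length alphabet)).keys = (pvInit cl.length alphabet).keys ∧
    ∀ c ∈ (pvInit cl.length alphabet).keys,
      ((List.range n).foldl (pvStepA cl) (pvInit cl.length alphabet)).getD c []
        = (List.range (cl.length+1)).map (pvGA cl c n) := by
  induction n with
  | zero =>
    refine ⟨rfl, fun c hc => ?_⟩
    simp only [List.range_zero, List.foldl_nil]
    rw [pv_getD_init _ _ _ ((pv_mem_keys_init _ _ _).mp hc)]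
    exact pv_replicate_eq cl c
  | succ n ih =>
    obtain ⟨ihk, ihv⟩ := ih (by omega)
    have hnl : n < cl.length := by omega
    rw [List.range_succ, List.foldl_append, List.foldl_cons, List.foldl_nil]
    set dn := (List.range n).foldl (pvStepA cl) (pvInit cl.length alphabet) with hdn
    have hndk : dn.keys.Nodup := ihk ▸ pv_nodup_init cl.length alphabet
    have hcurr : String.mk [cl.getD n ' '] ∈ dn.keys := by
      rw [ihk, pv_mem_keys_init]
      exact pv_curr_mem cl alphabet hPre hnl
    have hkeys1 : (dn.keys.foldl (fun d' k => d'.modify k [] (fun v => v.set (n+1) (v.getD n 0))) dn).keys = dn.keys := by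
      rw [PySem.Dict.keys_foldl_modify dn.keys [] (fun _ _ => fun v => v.set (n+1) (v.getD n 0)) dn]
      exact pv_update_self (fun k hk => hk)
    have hval1 : ∀ c, (dn.keys.foldl (fun d' k => d'.modify k [] (fun v => v.set (n+1) (v.getD n 0))) dn).getD c []
        = if c ∈ dn.keys then (dn.getD c []).set (n+1) ((dn.getD c []).getD n 0) else dn.getD c [] := by
      intro c
      exact pv_getD_foldl_modify dn.keys hndk _ dn c
    constructor
    · show (pvStepA cl dn n).keys = _
      unfold pvStepA
      rw [PySem.Dict.keys_modify]
      rw [PySem.Dict.keys_insert_of_contains _ _ (by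
        rw [PySem.Dict.contains_iff_mem_keys, hkeys1]; exact hcurr)]
      rw [hkeys1, ihk]
    · intro c hc
      have hcd : c ∈ dn.keys := ihk ▸ hc
      have hGAn : pvGA cl c n n = pvCnt cl c n := by unfold pvGA; rw [if_pos (le_refl n)]
      show (pvStepA cl dn n).getD c [] = _
      unfold pvStepA
      rw [PySem.Dict.getD_modify]
      by_cases hce : c = String.mk [cl.getD n ' ']
      · rw [if_pos hce, ← hce]
        rw [hval1 c, if_pos hcd, ihv c hc,
          PySem.List.getD_map_range _ _ _ _ (show n < cl.length+1 by omega)]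
        rw [hGAn, pv_set_map_range _ _ _ _ (show n+1 < cl.length+1 by omega),
          PySem.List.getD_map_range _ _ _ _ (show n+1 < cl.length+1 by omega), if_pos rfl,
          pv_set_map_range _ _ _ _ (show n+1 < cl.length+1 by omega)]
        apply pv_GA_step
        · rw [pv_cnt_succ cl c hnl]
          have : pvInd cl c n = 1 := by unfold pvInd; rw [if_pos hce.symm]
          omega
        · intro j hj; exact if_neg hj
      · rw [if_neg hce, hval1 c, if_pos hcd, ihv c hc,
          PySem.List.getD_map_range _ _ _ _ (show n < cl.length+1 by omega)]
        rw [hGAn, pv_set_map_range _ _ _ _ (show n+1 < cl.length+1 by omega)]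
        apply pv_GA_step
        · rw [pv_cnt_succ cl c hnl]
          have : pvInd cl c n = 0 := by unfold pvInd; rw [if_neg (fun hh => hce hh.symm)]
          omega
        · intro j hj; rfl

-- B's per-symbol scan body
def pvColStep (c : String) (p : List Int × Int) (ch : Char) : List Int × Int :=
  let run := if String.mk [ch] = c then p.2 + 1 else p.2
  (p.1 ++ [run], run)

theorem pv_col_loop (cl : List Char) (c : String) :
    ∀ (rest done : List Char), cl = done ++ rest →
    rest.foldl (pvColStep c) ((List.range (done.length+1)).map (fun j => pvCnt cl c j), pvCnt cl c done.length)
      = ((List.range (cl.length+1)).map (fun j => pvCnt cl c j), pvCnt cl c cl.length) := by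
  intro rest
  induction rest with
  | nil =>
    intro done h
    rw [List.append_nil] at h
    subst h
    rfl
  | cons ch rest' ih =>
    intro done h
    have hlt : done.length < cl.length := by
      rw [h, List.length_append, List.length_cons]; omega
    have hget : cl.getD done.length ' ' = ch := by
      rw [List.getD_eq_getElem?_getD, h, List.getElem?_append_right (le_refl done.length)]
      simp
    have hrun : (if String.mk [ch] = c then pvCnt cl c done.length + 1 else pvCnt cl c done.length)
        = pvCnt cl c (done.length+1) := by
      rw [pv_cnt_succ cl c hlt]
      unfold pvInd
      rw [hget]
      by_cases hc : String.mk [ch] = c <;> simp [hc]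
    have hacc : (List.range (done.length+1)).map (fun j => pvCnt cl c j) ++ [pvCnt cl c (done.length+1)]
        = (List.range (done.length+2)).map (fun j => pvCnt cl c j) := by
      simp [List.range_succ]
    rw [List.foldl_cons]
    show rest'.foldl (pvColStep c) (pvColStep c (_, _) ch) = _
    unfold pvColStep
    simp only [hrun, hacc]
    have hdone' : cl = (done ++ [ch]) ++ rest' := by rw [h]; simp
    have := ih (done ++ [ch]) hdone'
    simpa [List.length_append] using this

theorem pv_keys_B (cl : List Char) (alphabet : List String) :
    ((alphabet.foldl (fun d char =>
        d.insert char ((cl.foldl (pvColStep char) ([(0:Int)], (0:Int))).1)) PySem.Dict.empty)).keys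
      = PySem.Set.ofList alphabet := by
  rw [PySem.Dict.keys_foldl_insert alphabet
    (fun _ char => (cl.foldl (pvColStep char) ([(0:Int)], (0:Int))).1) PySem.Dict.empty]
  rw [PySem.Dict.keys_empty, PySem.Set.ofList_eq_foldl]
  rfl

theorem pv_col_full (cl : List Char) (c : String) :
    (cl.foldl (pvColStep c) ([(0:Int)], (0:Int))).1
      = (List.range (cl.length+1)).map (fun j => pvCnt cl c j) := by
  have h0 : (([(0:Int)], (0:Int)) : List Int × Int)
      = ((List.range (0+1)).map (fun j => pvCnt cl c j), pvCnt cl c 0) := by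
    simp [pv_cnt_zero]
  have := pv_col_loop cl c cl [] (by simp)
  simp only [List.length_nil] at this
  rw [h0]
  exact congrArg Prod.fst this

theorem pv_cs_eq (cl : List Char) (alphabet : List String)
    (hPre : ∀ ch ∈ cl, String.mk [ch] ∈ alphabet) :
    (List.range cl.length).foldl (pvStepA cl) (pvInit cl.length alphabet)
      = alphabet.foldl (fun d char =>
          d.insert char ((cl.foldl (pvColStep char) ([(0:Int)], (0:Int))).1)) PySem.Dict.empty := by
  obtain ⟨hAk, hAv⟩ := pv_A_loop cl alphabet hPre cl.length (le_refl _)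
  have hnd : (pvInit cl.length alphabet).keys.Nodup := pv_nodup_init _ _
  have hBk := pv_keys_B cl alphabet
  have hBnd : ((alphabet.foldl (fun d char =>
      d.insert char ((cl.foldl (pvColStep char) ([(0:Int)], (0:Int))).1)) PySem.Dict.empty)).keys.Nodup := by
    rw [hBk]; exact PySem.Set.nodup_ofList alphabet
  have hBv : ∀ c ∈ alphabet,
      ((alphabet.foldl (fun d char =>
        d.insert char ((cl.foldl (pvColStep char) ([(0:Int)], (0:Int))).1)) PySem.Dict.empty)).getD c []
      = (List.range (cl.length+1)).map (fun j => pvCnt cl c j) := by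
    intro c hc
    rw [pv_getD_foldl_insertf alphabet (fun k => (cl.foldl (pvColStep k) ([(0:Int)], (0:Int))).1) []
      PySem.Dict.empty c, if_pos hc]
    exact pv_col_full cl c
  apply PySem.Dict.ext
  rw [pv_items_eq _ (by rw [hAk]; exact hnd), pv_items_eq _ hBnd]
  rw [hAk, hBk, pv_keys_init]
  apply List.map_congr_left
  intro k hk
  have hk' : k ∈ alphabet := (PySem.Set.mem_ofList alphabet k).mp hk
  rw [hAv k (by rw [pv_mem_keys_init]; exact hk'), pv_GA_full, hBv k hk']

theorem pv_count_map (cl : List Char) (c : String) :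
    (((cl.map (fun ch => String.mk [ch])).count c : Int)) = pvCnt cl c cl.length := by
  unfold pvCnt
  rw [List.take_length]
  simp [List.count, List.countP_map, Function.comp_def, BEq.comm]

theorem pv_val_eq (cl : List Char) (alphabet : List String) (c : String) (hc : c ∈ alphabet) :
    (((alphabet.foldl (fun d char =>
        d.insert char ((cl.foldl (pvColStep char) ([(0:Int)], (0:Int))).1)) PySem.Dict.empty)).getD c []).getD cl.length 0
      = ((cl.map (fun ch => String.mk [ch])).foldl (fun d s => d.modify s 0 (· + 1))
          (alphabet.foldl (fun d char => d.insert char (0 : Int)) PySem.Dict.empty)).getD c 0 := by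
  rw [pv_getD_foldl_insertf alphabet (fun k => (cl.foldl (pvColStep k) ([(0:Int)], (0:Int))).1) []
    PySem.Dict.empty c, if_pos hc, pv_col_full,
    PySem.List.getD_map_range _ _ _ _ (show cl.length < cl.length+1 by omega)]
  rw [PySem.Dict.getD_foldl_modify_add_one,
    pv_getD_foldl_insertf alphabet (fun _ => (0:Int)) 0 PySem.Dict.empty c, if_pos hc,
    pv_count_map]
  omega

-- ===== VERDICT (by name: the statement is the Claim_ definition above) =====
theorem FirstOccurrence_CountSymbol_spec : Claim_equal_FirstOccurrence_CountSymbol := by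
  intro bwt alphabet _ hPre
  have hPre' : ∀ c ∈ bwt.toList, String.mk [c] ∈ alphabet := by
    intro c hc
    simpa using List.all_eq_true.mp hPre c hc
  show FirstOccurrence_CountSymbol bwt alphabet = FirstOccurrence_CountSymbol_alt bwt alphabet
  have h1 := congrArg (fun cs : PySem.Dict String (List Int) =>
      ((((PySem.List.sorted alphabet (fun x => x) false).foldl
        (fun (p : PySem.Dict String Int × Int) c =>
          (p.1.insert c p.2, p.2 + (cs.getD c []).getD bwt.toList.length 0))
        (PySem.Dict.empty, 0)).1.items : List (String × Int)), cs.items))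
    (pv_cs_eq bwt.toList alphabet hPre')
  refine h1.trans ?_
  have h2 : (PySem.List.sorted alphabet (fun x => x) false).foldl
        (fun (p : PySem.Dict String Int × Int) c =>
          (p.1.insert c p.2, p.2 + (((alphabet.foldl (fun d char =>
            d.insert char ((bwt.toList.foldl (pvColStep char) ([(0:Int)], (0:Int))).1)) PySem.Dict.empty)).getD c []).getD bwt.toList.length 0))
        (PySem.Dict.empty, 0)
      = (PySem.List.sorted alphabet (fun x => x) false).foldl
        (fun (p : PySem.Dict String Int × Int) c =>
          (p.1.insert c p.2, p.2 + ((bwt.toList.map (fun ch => String.mk [ch])).foldl (fun d s => d.modify s 0 (· + 1))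
            (alphabet.foldl (fun d char => d.insert char (0 : Int)) PySem.Dict.empty)).getD c 0))
        (PySem.Dict.empty, 0) := by
    apply PySem.List.foldl_congr_mem'
    intro c hc acc
    have hca : c ∈ alphabet := (PySem.List.mem_sorted _ _ _ _).mp hc
    rw [pv_val_eq bwt.toList alphabet c hca]
  exact congrArg (fun fo : PySem.Dict String Int × Int =>
      ((fo.1.items : List (String × Int)),
        ((alphabet.foldl (fun d char =>
          d.insert char ((bwt.toList.foldl (pvColStep char) ([(0:Int)], (0:Int))).1)) PySem.Dict.empty)).items)) h2
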